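-- pv_equiv track=rewrite | github.com/foolishzhao/leetcode | python3/weekly-contest-240/_1856_Maximum_Subarray_Min_Product/main.py | maxSumMinProduct
-- ===== SOURCE A (Python) =====
-- from typing import List
--
-- def maxSumMinProduct(nums: List[int]) -> int:
--     n = len(nums)
--     lb, rb = [0] * n, [n - 1] * n
--
--     st = list()
--     for i in range(n):
--         while st and nums[st[-1]] >= nums[i]:
--             st.pop()
--         if st:
--             lb[i] = st[-1] + 1
--         st.append(i)
--
--     st = list()
--     for i in range(n - 1, -1, -1):
--         while st and nums[st[-1]] >= nums[i]:
--             st.pop()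
--         if st:
--             rb[i] = st[-1] - 1
--         st.append(i)
--
--     preSum = [0] * (n + 1)
--     for i in range(1, n + 1):
--         preSum[i] = preSum[i - 1] + nums[i - 1]
--
--     res = 0
--     for i in range(n):
--         res = max(res, nums[i] * (preSum[rb[i] + 1] - preSum[lb[i]]))
--     return res % (10 ** 9 + 7)
-- ===== SOURCE B (Python) =====
-- from typing import List
--
-- def maxSumMinProduct(nums: List[int]) -> int:
--     n = len(nums)
--     pre = [0]
--     for v in nums:
--         pre.append(pre[-1] + v)
--     res = 0
--     for i in range(n):
--         l = i
--         while l > 0 and nums[l - 1] >= nums[i]: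
--             l -= 1
--         r = i
--         while r < n - 1 and nums[r + 1] >= nums[i]:
--             r += 1
--         res = max(res, nums[i] * (pre[r + 1] - pre[l]))
--     return res % (10 ** 9 + 7)
-- ===== Notes on version B (the rewrite author's own statement) =====
-- stated objective: simpler
-- what changed: A's two monotonic-stack passes building lb/rb boundary arrays are replaced by a single pass that finds each index's nearest-strictly-smaller boundaries with direct left/right scans over the array and a prefix-sum list built by appending.
import Mathlib
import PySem

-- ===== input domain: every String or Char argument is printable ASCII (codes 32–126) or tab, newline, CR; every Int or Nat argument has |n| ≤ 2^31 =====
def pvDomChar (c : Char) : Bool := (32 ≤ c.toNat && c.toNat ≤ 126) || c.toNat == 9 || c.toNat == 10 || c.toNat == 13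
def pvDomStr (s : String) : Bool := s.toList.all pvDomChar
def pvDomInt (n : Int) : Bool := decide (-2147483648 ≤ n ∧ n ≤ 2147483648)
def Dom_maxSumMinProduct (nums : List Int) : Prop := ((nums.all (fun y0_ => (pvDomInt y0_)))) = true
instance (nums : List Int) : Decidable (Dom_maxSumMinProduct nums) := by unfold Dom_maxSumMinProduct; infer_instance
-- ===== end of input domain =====

-- B replaces A's two monotonic-stack passes by direct per-index boundary scans: simpler code, same exact result.

-- B replaces A's two monotonic-stack passes and boundary arrays by direct per-index nearest-smaller scans over prefix sums: simpler structure, same exact value.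

-- ===== PORT A =====
-- 'while st and nums[st[-1]] >= nums[i]: st.pop()' — the stack is a Lean list with the top at the head
def popW (nums : List Int) (x : Int) : List Nat → List Nat
  | [] => []
  | j :: rest => if nums.getD j 0 ≥ x then popW nums x rest else j :: rest

-- one iteration of A's first loop: state = (st, lb)
def fwdStep (nums : List Int) (s : List Nat × List Int) (i : Nat) : List Nat × List Int :=
  let st' := popW nums (nums.getD i 0) s.1
  (i :: st', match st' with | [] => s.2 | j :: _ => s.2.set i ((j : Int) + 1))

-- one iteration of A's second loop: state = (st, rb)
def bwdStep (nums : List Int) (s : List Nat × List Int) (i : Nat) : List Nat × List Int :=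
  let st' := popW nums (nums.getD i 0) s.1
  (i :: st', match st' with | [] => s.2 | j :: _ => s.2.set i ((j : Int) - 1))

def maxSumMinProduct (nums : List Int) : Int :=
  let n := nums.length
  -- for i in range(n): …  (lb initialised to [0]*n)
  let fw := (List.range n).foldl (fwdStep nums) ([], List.replicate n (0 : Int))
  -- for i in range(n-1, -1, -1): …  (rb initialised to [n-1]*n); the iteration order n-1,…,0 is (range n).reverse
  let bw := ((List.range n).reverse).foldl (bwdStep nums) ([], List.replicate n ((n : Int) - 1))
  -- preSum[i] = preSum[i-1] + nums[i-1] for i in range(1, n+1)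
  let preSum := (List.range' 1 n).foldl
    (fun pre i => pre.set i (pre.getD (i - 1) 0 + nums.getD (i - 1) 0)) (List.replicate (n + 1) (0 : Int))
  -- preSum is indexed with the Int values rb[i]+1 and lb[i]; they are always in range, so .getD 0 after pyGet? is exact
  let res := (List.range n).foldl (fun res i =>
    max res (nums.getD i 0 *
      (((PySem.List.pyGet? preSum (bw.2.getD i 0 + 1)).getD 0) -
       ((PySem.List.pyGet? preSum (fw.2.getD i 0)).getD 0)))) 0
  PySem.Int.mod res (10 ^ 9 + 7)

-- ===== PORT B =====
-- 'l = i; while l > 0 and nums[l-1] >= nums[i]: l -= 1'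
def scanDown (nums : List Int) (x : Int) : Nat → Nat
  | 0 => 0
  | l + 1 => if nums.getD l 0 ≥ x then scanDown nums x l else l + 1

-- 'r = i; while r < n - 1 and nums[r+1] >= nums[i]: r += 1'
def scanUp (nums : List Int) (x : Int) (n : Nat) (r : Nat) : Nat :=
  if h : r + 1 < n ∧ nums.getD (r + 1) 0 ≥ x then scanUp nums x n (r + 1) else r
termination_by n - r
decreasing_by omega

def maxSumMinProduct_alt (nums : List Int) : Int :=
  let n := nums.length
  -- pre.append(pre[-1] + v): pre is never empty, pre[-1] = pre.getD (pre.length - 1)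
  let pre := nums.foldl (fun pre v => pre ++ [pre.getD (pre.length - 1) 0 + v]) [(0 : Int)]
  let res := (List.range n).foldl (fun res i =>
    max res (nums.getD i 0 *
      (pre.getD (scanUp nums (nums.getD i 0) n i + 1) 0 - pre.getD (scanDown nums (nums.getD i 0) i) 0))) 0
  PySem.Int.mod res (10 ^ 9 + 7)

-- ===== PRECONDITION & SPEC =====
def Spec_maxSumMinProduct (nums : List Int) (out : Int) : Prop := out = maxSumMinProduct_alt nums
instance (nums : List Int) (out : Int) : Decidable (Spec_maxSumMinProduct nums out) := by unfold Spec_maxSumMinProduct; infer_instance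

-- ===== CLAIM (what is proved, stated in full; the proofs are below) =====
def Claim_equal_maxSumMinProduct : Prop := ∀ (nums : List Int), Dom_maxSumMinProduct nums → Spec_maxSumMinProduct nums (maxSumMinProduct nums)

-- ===== LEMMAS AND PROOFS =====
def psum (nums : List Int) (i : Nat) : Int := (nums.take i).sum

theorem popW_popW (nums : List Int) {x y : Int} (h : x ≤ y) (S : List Nat) :
    popW nums x (popW nums y S) = popW nums x S := by
  induction S with
  | nil => rfl
  | cons j T ih =>
    simp only [popW]
    by_cases hy : nums.getD j 0 ≥ y
    · rw [if_pos hy, ih, if_pos (le_trans h hy)]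
    · rw [if_neg hy]
      simp only [popW]

def fStack (nums : List Int) : Nat → List Nat
  | 0 => []
  | p + 1 => p :: popW nums (nums.getD p 0) (fStack nums p)

def dScan (nums : List Int) (x : Int) : Nat → Option Nat
  | 0 => none
  | p + 1 => if nums.getD p 0 < x then some p else dScan nums x p

theorem head_popW_fStack (nums : List Int) (x : Int) (p : Nat) :
    (popW nums x (fStack nums p)).head? = dScan nums x p := by
  induction p with
  | zero => rfl
  | succ p ih =>
    simp only [fStack, popW, dScan]
    by_cases hc : nums.getD p 0 ≥ x
    · rw [if_pos hc, if_neg (not_lt.mpr hc), popW_popW nums hc, ih]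
    · rw [if_neg hc, if_pos (lt_of_not_ge hc)]
      rfl

def bStack (nums : List Int) (n : Nat) : Nat → List Nat
  | 0 => []
  | k + 1 => (n - 1 - k) :: popW nums (nums.getD (n - 1 - k) 0) (bStack nums n k)

def uScan (nums : List Int) (n : Nat) (x : Int) : Nat → Option Nat
  | 0 => none
  | k + 1 => if nums.getD (n - 1 - k) 0 < x then some (n - 1 - k) else uScan nums n x k

theorem head_popW_bStack (nums : List Int) (n : Nat) (x : Int) (k : Nat) :
    (popW nums x (bStack nums n k)).head? = uScan nums n x k := by
  induction k with
  | zero => rfl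
  | succ k ih =>
    simp only [bStack, popW, uScan]
    by_cases hc : nums.getD (n - 1 - k) 0 ≥ x
    · rw [if_pos hc, if_neg (not_lt.mpr hc), popW_popW nums hc, ih]
    · rw [if_neg hc, if_pos (lt_of_not_ge hc)]
      rfl

theorem uScan_some_bounds (nums : List Int) (n : Nat) (x : Int) (hn : 0 < n) (k q : Nat)
    (h : uScan nums n x k = some q) : n - k ≤ q ∧ q < n := by
  induction k with
  | zero => simp [uScan] at h
  | succ k ih =>
    simp only [uScan] at h
    split_ifs at h with hc
    · injection h with h
      omega
    · have := ih h
      omega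

theorem scanDown_eq (nums : List Int) (x : Int) (i : Nat) :
    scanDown nums x i = (match dScan nums x i with | some q => q + 1 | none => 0) := by
  induction i with
  | zero => rfl
  | succ i ih =>
    simp only [scanDown, dScan]
    by_cases hc : nums.getD i 0 ≥ x
    · rw [if_pos hc, if_neg (not_lt.mpr hc), ih]
    · rw [if_neg hc, if_pos (lt_of_not_ge hc)]

theorem scanDown_le (nums : List Int) (x : Int) (i : Nat) : scanDown nums x i ≤ i := by
  induction i with
  | zero => simp [scanDown]
  | succ i ih =>
    simp only [scanDown]
    split_ifs
    · omega
    · omega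

theorem scanUp_eq (nums : List Int) (x : Int) (n : Nat) :
    ∀ k i, i < n → k = n - 1 - i →
    scanUp nums x n i = (match uScan nums n x k with | some q => q - 1 | none => n - 1) := by
  intro k
  induction k with
  | zero =>
    intro i hin hk
    rw [scanUp]
    rw [dif_neg (fun hh => absurd hh.1 (by omega))]
    have hi : i = n - 1 := by omega
    simpa [uScan] using hi
  | succ k ih =>
    intro i hin hk
    have hi1 : n - 1 - k = i + 1 := by omega
    have hi1n : i + 1 < n := by omega
    rw [scanUp]
    simp only [uScan, hi1]
    by_cases hc : nums.getD (i + 1) 0 ≥ x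
    · rw [dif_pos ⟨hi1n, hc⟩, if_neg (not_lt.mpr hc), ih (i + 1) hi1n (by omega)]
    · rw [dif_neg (fun hh => hc hh.2), if_pos (lt_of_not_ge hc)]
      show i = i + 1 - 1
      omega
theorem fwd_fold (nums : List Int) :
    ∀ (m : Nat) (lb : List Int), m ≤ lb.length →
    ((List.range m).foldl (fwdStep nums) ([], lb)).1 = fStack nums m ∧
    ((List.range m).foldl (fwdStep nums) ([], lb)).2.length = lb.length ∧
    ∀ i, ((List.range m).foldl (fwdStep nums) ([], lb)).2.getD i 0 =
      if i < m then (match dScan nums (nums.getD i 0) i with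
        | some q => (q : Int) + 1
        | none => lb.getD i 0)
      else lb.getD i 0 := by
  intro m
  induction m with
  | zero =>
    intro lb _
    refine ⟨rfl, rfl, ?_⟩
    intro i
    simp
  | succ m ih =>
    intro lb hm
    obtain ⟨h1, h2, h3⟩ := ih lb (by omega)
    rw [List.range_succ, List.foldl_append, List.foldl_cons, List.foldl_nil]
    simp only [fwdStep, h1]
    have hhead := head_popW_fStack nums (nums.getD m 0) m
    cases hst : popW nums (nums.getD m 0) (fStack nums m) with
    | nil =>
      rw [hst] at hhead
      refine ⟨by rw [fStack, hst], h2, ?_⟩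
      intro i
      rw [h3 i]
      by_cases him : i < m
      · rw [if_pos him, if_pos (by omega)]
      · by_cases him2 : i = m
        · subst him2
          rw [if_neg him, if_pos (by omega), ← hhead]
          rfl
        · rw [if_neg him, if_neg (by omega)]
    | cons j t =>
      rw [hst] at hhead
      refine ⟨by rw [fStack, hst], by rw [List.length_set, h2], ?_⟩
      intro i
      by_cases him2 : i = m
      · subst him2
        rw [List.getD_eq_getElem?_getD, List.getElem?_set_self (by omega), if_pos (by omega), ← hhead]
        rfl
      · rw [List.getD_eq_getElem?_getD, List.getElem?_set_ne (fun hh => him2 hh.symm),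
            ← List.getD_eq_getElem?_getD, h3 i]
        by_cases him : i < m
        · rw [if_pos him, if_pos (by omega)]
        · rw [if_neg him, if_neg (by omega)]

theorem bwd_fold (nums : List Int) (n : Nat) :
    ∀ (m : Nat) (rb : List Int), m ≤ n → n ≤ rb.length →
    (((List.range' (n - m) m).reverse).foldl (bwdStep nums) ([], rb)).1 = bStack nums n m ∧
    (((List.range' (n - m) m).reverse).foldl (bwdStep nums) ([], rb)).2.length = rb.length ∧
    ∀ i, (((List.range' (n - m) m).reverse).foldl (bwdStep nums) ([], rb)).2.getD i 0 =
      if n - m ≤ i ∧ i < n then (match uScan nums n (nums.getD i 0) (n - 1 - i) with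
        | some q => (q : Int) - 1
        | none => rb.getD i 0)
      else rb.getD i 0 := by
  intro m
  induction m with
  | zero =>
    intro rb _ _
    refine ⟨rfl, rfl, ?_⟩
    intro i
    rw [if_neg (by omega)]
    rfl
  | succ m ih =>
    intro rb hm hlen
    obtain ⟨h1, h2, h3⟩ := ih rb (by omega) hlen
    have hs : n - (m + 1) = n - m - 1 := by omega
    have hrev : (List.range' (n - (m + 1)) (m + 1)).reverse
        = (List.range' (n - m) m).reverse ++ [n - m - 1] := by
      rw [hs, List.range'_succ]
      have : n - m - 1 + 1 = n - m := by omega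
      rw [this, List.reverse_cons]
    rw [hrev, List.foldl_append, List.foldl_cons, List.foldl_nil]
    simp only [bwdStep, h1]
    have hmm : n - m - 1 = n - 1 - m := by omega
    have hhead := head_popW_bStack nums n (nums.getD (n - 1 - m) 0) m
    rw [← hmm] at hhead
    cases hst : popW nums (nums.getD (n - m - 1) 0) (bStack nums n m) with
    | nil =>
      rw [hst] at hhead
      refine ⟨by rw [bStack, ← hmm, hst], h2, ?_⟩
      intro i
      rw [h3 i]
      by_cases him : n - m ≤ i ∧ i < n
      · rw [if_pos him, if_pos (by omega)]
      · by_cases him2 : i = n - m - 1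
        · subst him2
          rw [if_neg him, if_pos (by omega)]
          have hfuel : n - 1 - (n - m - 1) = m := by omega
          rw [hfuel, ← hhead]
          rfl
        · rw [if_neg him, if_neg (by omega)]
    | cons j t =>
      rw [hst] at hhead
      refine ⟨by rw [bStack, ← hmm, hst], by rw [List.length_set, h2], ?_⟩
      intro i
      by_cases him2 : i = n - m - 1
      · subst him2
        rw [List.getD_eq_getElem?_getD, List.getElem?_set_self (by omega), if_pos (by omega)]
        have hfuel : n - 1 - (n - m - 1) = m := by omega
        rw [hfuel, ← hhead]
        rfl
      · rw [List.getD_eq_getElem?_getD, List.getElem?_set_ne (fun hh => him2 hh.symm),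
            ← List.getD_eq_getElem?_getD, h3 i]
        by_cases him : n - m ≤ i ∧ i < n
        · rw [if_pos him, if_pos (by omega)]
        · rw [if_neg him, if_neg (by omega)]

theorem psum_succ (nums : List Int) (k : Nat) (h : k < nums.length) :
    psum nums (k + 1) = psum nums k + nums.getD k 0 := by
  unfold psum
  rw [List.take_add_one, List.sum_append, List.getElem?_eq_getElem h]
  simp [List.getD_eq_getElem?_getD, List.getElem?_eq_getElem h]

theorem preA (nums : List Int) :
    ∀ k, k ≤ nums.length →
    ((List.range' 1 k).foldl (fun pre i => pre.set i (pre.getD (i - 1) 0 + nums.getD (i - 1) 0))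
      (List.replicate (nums.length + 1) (0 : Int))).length = nums.length + 1 ∧
    ∀ i, i ≤ k → ((List.range' 1 k).foldl (fun pre i => pre.set i (pre.getD (i - 1) 0 + nums.getD (i - 1) 0))
      (List.replicate (nums.length + 1) (0 : Int))).getD i 0 = psum nums i := by
  intro k
  induction k with
  | zero =>
    intro _
    refine ⟨by simp, ?_⟩
    intro i hi
    have : i = 0 := by omega
    subst this
    simp [psum]
  | succ k ih =>
    intro hk
    obtain ⟨h1, h2⟩ := ih (by omega)
    have hcat : List.range' 1 (k + 1) = List.range' 1 k ++ [1 + k] := by simp [List.range'_concat]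
    rw [hcat, List.foldl_append, List.foldl_cons, List.foldl_nil]
    refine ⟨by rw [List.length_set, h1], ?_⟩
    intro i hi
    have hsub : 1 + k - 1 = k := by omega
    by_cases him : i = 1 + k
    · subst him
      rw [List.getD_eq_getElem?_getD, List.getElem?_set_self (by omega), hsub]
      simp only [Option.getD_some]
      rw [h2 k (by omega), Nat.add_comm 1 k, psum_succ nums k (by omega)]
    · rw [List.getD_eq_getElem?_getD, List.getElem?_set_ne (fun hh => him hh.symm),
          ← List.getD_eq_getElem?_getD, h2 i (by omega)]

theorem psum_len (nums : List Int) : psum nums nums.length = nums.sum := by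
  simp [psum]

theorem preB (nums : List Int) :
    (nums.foldl (fun pre v => pre ++ [pre.getD (pre.length - 1) 0 + v]) [(0 : Int)]).length = nums.length + 1 ∧
    ∀ i, i ≤ nums.length →
      (nums.foldl (fun pre v => pre ++ [pre.getD (pre.length - 1) 0 + v]) [(0 : Int)]).getD i 0 = psum nums i := by
  induction nums using List.reverseRecOn with
  | nil =>
    refine ⟨rfl, ?_⟩
    intro i hi
    simp only [List.length_nil, Nat.le_zero] at hi
    subst hi
    simp [psum]
  | append_singleton xs x ih =>
    obtain ⟨h1, h2⟩ := ih
    rw [List.foldl_append, List.foldl_cons, List.foldl_nil]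
    refine ⟨by rw [List.length_append, h1, List.length_append]; simp, ?_⟩
    intro i hi
    rw [List.length_append, List.length_singleton] at hi
    by_cases him : i = xs.length + 1
    · subst him
      have hlast : (xs.foldl (fun pre v => pre ++ [pre.getD (pre.length - 1) 0 + v]) [(0 : Int)]).length = xs.length + 1 := h1
      rw [List.getD_eq_getElem?_getD]
      have : xs.length + 1 = (xs.foldl (fun pre v => pre ++ [pre.getD (pre.length - 1) 0 + v]) [(0 : Int)]).length := h1.symm
      rw [this, List.getElem?_concat_length]
      simp only [Option.getD_some]
      rw [h1, Nat.add_sub_cancel, h2 xs.length le_rfl, psum_len]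
      unfold psum
      rw [List.take_of_length_le (by simp), List.sum_append]
      simp
    · have hilt : i < xs.length + 1 := by omega
      rw [List.getD_eq_getElem?_getD, List.getElem?_append_left (by omega : i < _), ← List.getD_eq_getElem?_getD, h2 i (by omega)]
      unfold psum
      rw [List.take_append_of_le_length (by omega)]
theorem step_values (nums : List Int) (i : Nat) (hin : i < nums.length) :
    (((List.range nums.length).foldl (fwdStep nums) ([], List.replicate nums.length (0 : Int))).2.getD i 0
      = ((scanDown nums (nums.getD i 0) i : Nat) : Int)) ∧
    (((List.range nums.length).reverse).foldl (bwdStep nums)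
        ([], List.replicate nums.length ((nums.length : Int) - 1))).2.getD i 0 + 1
      = ((scanUp nums (nums.getD i 0) nums.length i + 1 : Nat) : Int) := by
  obtain ⟨hf1, hf2, hf3⟩ := fwd_fold nums nums.length (List.replicate nums.length 0) (by simp)
  obtain ⟨hb1, hb2, hb3⟩ := bwd_fold nums nums.length nums.length
    (List.replicate nums.length ((nums.length : Int) - 1)) le_rfl (by simp)
  rw [Nat.sub_self, ← List.range_eq_range'] at hb3
  constructor
  · rw [hf3 i, if_pos hin, scanDown_eq]
    cases hd : dScan nums (nums.getD i 0) i with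
    | none =>
      simp [List.getD_eq_getElem?_getD, hin]
    | some q =>
      push_cast
      ring
  · rw [hb3 i, if_pos ⟨by omega, hin⟩,
        scanUp_eq nums (nums.getD i 0) nums.length (nums.length - 1 - i) i hin rfl]
    cases hu : uScan nums nums.length (nums.getD i 0) (nums.length - 1 - i) with
    | none =>
      have hr : (List.replicate nums.length ((nums.length : Int) - 1)).getD i 0 = (nums.length : Int) - 1 := by
        simp [List.getD_eq_getElem?_getD, hin]
      rw [hr]
      have h1 : nums.length - 1 + 1 = nums.length := by omega
      rw [h1]
      ring
    | some q =>
      obtain ⟨hq1, hq2⟩ := uScan_some_bounds nums nums.length (nums.getD i 0) (by omega) _ _ hu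
      have h1 : q - 1 + 1 = q := by omega
      rw [h1]
      have h2 : (1 : Int) ≤ (q : Int) := by exact_mod_cast Nat.one_le_iff_ne_zero.mpr (by omega)
      push_cast
      ring

theorem final_eq (nums : List Int) : maxSumMinProduct nums = maxSumMinProduct_alt nums := by
  obtain ⟨hA1, hA2⟩ := preA nums nums.length le_rfl
  obtain ⟨hB1, hB2⟩ := preB nums
  unfold maxSumMinProduct maxSumMinProduct_alt
  simp only []
  congr 1
  apply PySem.List.foldl_congr_mem
  intro acc i hi
  rw [List.mem_range] at hi
  have hin : i < nums.length := hi
  obtain ⟨hlb, hrb⟩ := step_values nums i hin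
  rw [hlb, hrb, PySem.List.pyGet?_natCast, PySem.List.pyGet?_natCast,
      ← List.getD_eq_getElem?_getD, ← List.getD_eq_getElem?_getD]
  have hsd : scanDown nums (nums.getD i 0) i ≤ nums.length :=
    le_trans (scanDown_le nums (nums.getD i 0) i) (by omega)
  have hsu : scanUp nums (nums.getD i 0) nums.length i + 1 ≤ nums.length := by
    rw [scanUp_eq nums (nums.getD i 0) nums.length (nums.length - 1 - i) i hin rfl]
    cases hu : uScan nums nums.length (nums.getD i 0) (nums.length - 1 - i) with
    | none =>
      show nums.length - 1 + 1 ≤ nums.length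
      omega
    | some q =>
      obtain ⟨hq1, hq2⟩ := uScan_some_bounds nums nums.length (nums.getD i 0) (by omega) _ _ hu
      show q - 1 + 1 ≤ nums.length
      omega
  rw [hA2 _ hsu, hA2 _ hsd, hB2 _ hsu, hB2 _ hsd]

-- ===== VERDICT (by name: the statement is the Claim_ definition above) =====
theorem maxSumMinProduct_spec : Claim_equal_maxSumMinProduct := by
  intro nums _
  unfold Spec_maxSumMinProduct
  exact final_eq nums
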